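-- pv_equiv track=rewrite | github.com/VZHENG3098/Breast-Cancer-Classfication | Breast_Cancer_Labeling.py | stopCriteria
-- ===== SOURCE A (Python) =====
-- def stopCriteria(dataSet):
--     assignedLabel = None
--     returnBool = True
--     MajorityTable = dict()
--     labelIndex = len(dataSet[0]) - 1
--     for currentLabel in dataSet:
--         if currentLabel[labelIndex] in MajorityTable:
--             MajorityTable[currentLabel[labelIndex]] += 1
--         else:
--             MajorityTable[currentLabel[labelIndex]] = 1
--         if assignedLabel == None:
--             assignedLabel = currentLabel[labelIndex]
--         else:
--             if assignedLabel != currentLabel[labelIndex]: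
--                 returnBool = False
--
--     if returnBool:
--         return assignedLabel
--
--     SortedDict = sorted(MajorityTable.items(), key=lambda kv: kv[1], reverse=True)
--     if len(dataSet[0]) <= 1:
--         return SortedDict[0][0]
--     return None
-- ===== SOURCE B (Python) =====
-- def stopCriteria(dataSet):
--     labelIndex = len(dataSet[0]) - 1
--     labels = [row[labelIndex] for row in dataSet]
--     if labels.count(labels[0]) == len(labels):
--         return labels[0]
--     if labelIndex <= 0:
--         return max(labels, key=labels.count)
--     return None
-- ===== Notes on version B (the rewrite author's own statement) =====
-- stated objective: simpler
-- what changed: A maintains a counter dict and a uniformity flag in one fused loop and then sorts the counts to pick the mode; B keeps no table at all: it tests uniformity by comparing the first label's count with the list length and picks the majority label as the first arg-max of list.count.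
import Mathlib
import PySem

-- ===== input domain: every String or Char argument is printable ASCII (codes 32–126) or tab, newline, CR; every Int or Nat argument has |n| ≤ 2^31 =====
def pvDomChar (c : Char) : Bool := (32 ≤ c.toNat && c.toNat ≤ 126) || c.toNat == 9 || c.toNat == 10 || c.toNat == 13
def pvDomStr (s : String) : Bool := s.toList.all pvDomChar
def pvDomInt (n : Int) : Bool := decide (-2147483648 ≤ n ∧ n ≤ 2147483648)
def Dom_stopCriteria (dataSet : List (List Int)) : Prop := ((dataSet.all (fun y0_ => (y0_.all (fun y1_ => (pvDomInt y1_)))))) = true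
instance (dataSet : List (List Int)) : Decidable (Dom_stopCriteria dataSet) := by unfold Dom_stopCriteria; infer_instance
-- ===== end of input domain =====

-- B drops A's counter dict, boolean flag and sort entirely: it tests uniformity by
-- comparing the count of the first label with the list length, and picks the majority
-- label as the first arg-max of list.count; objective: simpler (B is quadratic, not faster).

-- ===== PORT A =====
-- the table update of A's loop: 'if v in MajorityTable: +=1 else: =1'
def stopA_step (t : PySem.Dict Int Int) (v : Int) : PySem.Dict Int Int :=
  if t.contains v then t.insert v (t.getD v 0 + 1) else t.insert v 1

-- A's single 'for currentLabel in dataSet' loop, carrying (assignedLabel, returnBool, MajorityTable)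
def stopA_loop (idx : Int) : List (List Int) → Option Int → Bool → PySem.Dict Int Int →
    Option Int × Bool × PySem.Dict Int Int
  | [], a, r, t => (a, r, t)
  | row :: rest, a, r, t =>
    let v := (PySem.List.pyGet? row idx).getD 0   -- currentLabel[labelIndex]; in range on Pre_
    let t' := stopA_step t v
    match a with
    | none => stopA_loop idx rest (some v) r t'
    | some al => stopA_loop idx rest (some al) (if al ≠ v then false else r) t'

def stopCriteria (dataSet : List (List Int)) : Option Int :=
  let row0 := (PySem.List.pyGet? dataSet 0).getD []        -- dataSet[0]; some on Pre_
  let labelIndex : Int := (row0.length : Int) - 1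
  let st := stopA_loop labelIndex dataSet none true PySem.Dict.empty
  if st.2.1 then st.1
  else
    let sortedD := PySem.List.sorted st.2.2.items (fun kv => kv.2) true
    if (row0.length : Int) ≤ 1 then some (((PySem.List.pyGet? sortedD 0).getD (0, 0)).1)
    else none

-- ===== PORT B =====
def stopCriteria_alt (dataSet : List (List Int)) : Option Int :=
  let labelIndex : Int := ((((PySem.List.pyGet? dataSet 0).getD []).length : Int)) - 1
  let labels := dataSet.map (fun row => (PySem.List.pyGet? row labelIndex).getD 0)
  let first := (PySem.List.pyGet? labels 0).getD 0
  if ((PySem.List.count labels first : Int)) == PySem.List.len labels then some first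
  else if labelIndex ≤ 0 then
    PySem.List.max? labels (fun l => (PySem.List.count labels l : Int))   -- max(labels, key=labels.count)
  else none

-- ===== PRECONDITION & SPEC =====
-- Pre_ excludes exactly the inputs where Python A raises IndexError: the empty dataSet
-- (dataSet[0]) and dataSets in which row[labelIndex] is out of range for some row
-- (labelIndex = len(dataSet[0]) - 1; for the first row itself this forces a nonempty first row).
def Pre_stopCriteria (dataSet : List (List Int)) : Prop :=
  dataSet ≠ [] ∧ ∀ row ∈ dataSet, max 1 (dataSet.headD []).length ≤ row.length
instance (dataSet : List (List Int)) : Decidable (Pre_stopCriteria dataSet) := by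
  unfold Pre_stopCriteria; infer_instance
def pvWitness_stopCriteria : List (List Int) := [[1, 0], [1, 1]]

def Spec_stopCriteria (dataSet : List (List Int)) (out : Option Int) : Prop := out = stopCriteria_alt dataSet
instance (dataSet : List (List Int)) (out : Option Int) : Decidable (Spec_stopCriteria dataSet out) := by unfold Spec_stopCriteria; infer_instance

-- ===== CLAIM (what is proved, stated in full; the proofs are below) =====
def Claim_equal_stopCriteria : Prop := ∀ (dataSet : List (List Int)), Dom_stopCriteria dataSet → Pre_stopCriteria dataSet → Spec_stopCriteria dataSet (stopCriteria dataSet)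

-- ===== LEMMAS AND PROOFS =====

-- A's table update is the unconditional counting update
theorem stopA_step_eq (t : PySem.Dict Int Int) (v : Int) :
    stopA_step t v = t.insert v (t.getD v 0 + 1) := by
  unfold stopA_step
  by_cases h : t.contains v
  · simp [h]
  · rw [if_neg h]
    have h0 : t.getD v 0 = 0 := by
      simp only [PySem.Dict.getD, PySem.Dict.get?, PySem.Dict.contains, Bool.not_eq_true,
        List.any_eq_false] at *
      rw [List.find?_eq_none.mpr]
      · rfl
      · intro x hx; simpa using h x hx
    rw [h0]; norm_num

-- characterisation of A's loop once assignedLabel is set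
theorem stopA_loop_some (idx : Int) (rest : List (List Int)) :
    ∀ (a0 : Int) (r : Bool) (t : PySem.Dict Int Int),
    stopA_loop idx rest (some a0) r t =
      (some a0,
       r && rest.all (fun row => ((PySem.List.pyGet? row idx).getD 0) == a0),
       rest.foldl (fun t row => stopA_step t ((PySem.List.pyGet? row idx).getD 0)) t) := by
  induction rest with
  | nil => intro a0 r t; simp [stopA_loop]
  | cons row rest ih =>
    intro a0 r t
    simp only [stopA_loop, ih, List.all_cons, List.foldl_cons]
    simp only [Prod.mk.injEq]
    refine ⟨trivial, ?_, trivial⟩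
    by_cases h : a0 = ((PySem.List.pyGet? row idx).getD 0)
    · subst h; simp
    · have hb : (((PySem.List.pyGet? row idx).getD 0) == a0) = false := by
        simp only [beq_eq_false_iff_ne, ne_eq]
        omega
      simp [h, hb]

-- head of Python's stable reverse sort is Python's max (first extremal element)
theorem head_sorted_rev_eq_max? {α κ : Type} [LinearOrder κ] (xs : List α) (key : α → κ) :
    (PySem.List.sorted xs key true).head? = PySem.List.max? xs key := by
  rw [PySem.List.sorted_rev_eq_foldl_insertBy]
  unfold PySem.List.max?
  suffices h : ∀ (acc : List α),
      (xs.foldl (fun acc x => PySem.List.insertBy (fun a b => decide (key b < key a)) x acc) acc).head?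
      = xs.foldl (fun m x => match m with
          | none => some x
          | some m => if key m < key x then some x else some m) acc.head? by
    simpa using h []
  induction xs with
  | nil => intro acc; rfl
  | cons x xs ih =>
    intro acc
    simp only [List.foldl_cons]
    rw [ih]
    congr 1
    cases acc with
    | nil => rfl
    | cons y ys =>
      simp only [PySem.List.insertBy, List.head?_cons]
      by_cases h : key y < key x
      · simp [h]
      · simp [h]

-- max over a mapped list
theorem max?_map {α β κ : Type} [LinearOrder κ] (l : List α) (f : α → β) (g : β → κ) :
    PySem.List.max? (l.map f) g = (PySem.List.max? l (fun x => g (f x))).map f := by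
  unfold PySem.List.max?
  suffices h : ∀ (acc : Option α),
      (l.map f).foldl (fun m x => match m with
          | none => some x
          | some m => if g m < g x then some x else some m) (acc.map f)
      = (l.foldl (fun m x => match m with
          | none => some x
          | some m => if g (f m) < g (f x) then some x else some m) acc).map f by
    simpa using h none
  induction l with
  | nil => intro acc; rfl
  | cons x xs ih =>
    intro acc
    simp only [List.map_cons, List.foldl_cons]
    rw [← ih]
    congr 1
    cases acc with
    | none => rfl
    | some m => by_cases h : g (f m) < g (f x) <;> simp [h]

-- one fold step of max? skips an element already dominated
theorem max?_step_skip {α κ : Type} [LinearOrder κ] (ks : List α) (g : α → κ) (x : α)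
    (hx : x ∈ ks) :
    (match PySem.List.max? ks g with
      | none => some x
      | some m => if g m < g x then some x else some m) = PySem.List.max? ks g := by
  cases hm : PySem.List.max? ks g with
  | none =>
    rw [PySem.List.max?_eq_none_iff] at hm
    subst hm; cases hx
  | some m =>
    have hle : g x ≤ g m := PySem.List.max?_isMax hm x hx
    simp [not_lt_of_ge hle]

-- max? of a list with one appended element is one fold step
theorem max?_append_singleton {α κ : Type} [LinearOrder κ] (ks : List α) (g : α → κ) (x : α) :
    PySem.List.max? (ks ++ [x]) g =
      (match PySem.List.max? ks g with
        | none => some x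
        | some m => if g m < g x then some x else some m) := by
  unfold PySem.List.max?
  rw [List.foldl_append]
  rfl

-- first arg-max is unchanged by first-occurrence deduplication (via the Set.add fold)
theorem max?_foldl_add {α κ : Type} [BEq α] [LawfulBEq α] [LinearOrder κ] (g : α → κ) :
    ∀ (L ks : List α),
    L.foldl (fun m x => match m with
      | none => some x
      | some m => if g m < g x then some x else some m) (PySem.List.max? ks g)
    = PySem.List.max? (L.foldl PySem.Set.add ks) g := by
  intro L
  induction L with
  | nil => intro ks; rfl
  | cons x L ih =>
    intro ks
    simp only [List.foldl_cons]
    by_cases h : ks.contains x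
    · have hx : x ∈ ks := List.mem_of_elem_eq_true h
      have hadd : PySem.Set.add ks x = ks := by simp [PySem.Set.add, PySem.Set.contains, hx]
      rw [max?_step_skip ks g x hx, hadd]
      exact ih ks
    · have hx : x ∉ ks := fun hm => h (List.elem_eq_true_of_mem hm)
      have hadd : PySem.Set.add ks x = ks ++ [x] := by simp [PySem.Set.add, PySem.Set.contains, hx]
      rw [hadd, ← max?_append_singleton ks g x]
      exact ih (ks ++ [x])

theorem max?_ofList {α κ : Type} [BEq α] [LawfulBEq α] [LinearOrder κ] (L : List α) (g : α → κ) :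
    PySem.List.max? (PySem.Set.ofList L) g = PySem.List.max? L g := by
  rw [PySem.Set.ofList_eq_foldl, ← max?_foldl_add g L []]
  rfl

-- ===== VERDICT (by name: the statement is the Claim_ definition above) =====
theorem stopCriteria_spec : Claim_equal_stopCriteria := by
  intro dataSet _ hpre
  unfold Spec_stopCriteria
  obtain ⟨hne, -⟩ := hpre
  cases dataSet with
  | nil => exact absurd rfl hne
  | cons r0 rest =>
    clear hne
    unfold stopCriteria stopCriteria_alt
    have hget0 : PySem.List.pyGet? (r0 :: rest) 0 = some r0 := by
      simp [PySem.List.pyGet?, PySem.List.pyIdx?]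
    rw [hget0]
    simp only [Option.getD_some]
    set idx : Int := (r0.length : Int) - 1 with hidx
    set v : List Int → Int := fun row => (PySem.List.pyGet? row idx).getD 0 with hv
    -- A's loop, characterised; its table is Counter(labels)
    set labels : List Int := v r0 :: rest.map v with hlabels'
    have hloop : stopA_loop idx (r0 :: rest) none true PySem.Dict.empty =
        (some (v r0),
         rest.all (fun row => v row == v r0),
         PySem.Dict.counter labels) := by
      show stopA_loop idx rest (some (v r0)) true (stopA_step PySem.Dict.empty (v r0)) = _
      rw [stopA_loop_some]
      simp only [stopA_step_eq, Bool.true_and]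
      have : rest.foldl (fun (t : PySem.Dict Int Int) row => t.insert ((PySem.List.pyGet? row idx).getD 0)
              (t.getD ((PySem.List.pyGet? row idx).getD 0) 0 + 1))
            (PySem.Dict.empty.insert (v r0) (PySem.Dict.empty.getD (v r0) 0 + 1))
          = labels.foldl (fun (d : PySem.Dict Int Int) x => d.insert x (d.getD x 0 + 1)) PySem.Dict.empty := by
        simp only [hlabels', List.foldl_cons, List.foldl_map, hv]
      exact Prod.ext rfl (Prod.ext rfl
        (this.trans (PySem.Dict.foldl_insert_getD_add_one_eq_counter labels)))
    rw [hloop]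
    -- B's labels and first
    have hlabels : (r0 :: rest).map (fun row => (PySem.List.pyGet? row idx).getD 0) = labels := by
      simp [hlabels', hv]
    rw [hlabels]
    have hfirst : (PySem.List.pyGet? labels 0).getD 0 = v r0 := by
      simp [hlabels', PySem.List.pyGet?, PySem.List.pyIdx?]
    rw [hfirst]
    -- the two uniformity tests coincide
    have hall : (((PySem.List.count labels (v r0) : Int)) == PySem.List.len labels)
        = rest.all (fun row => v row == v r0) := by
      rw [PySem.List.count_eq, PySem.List.len_eq]
      by_cases hu : rest.all (fun row => v row == v r0)
      · have : ∀ b ∈ labels, v r0 = b := by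
          intro b hb
          rcases List.mem_cons.mp hb with hb | hb
          · omega
          · rcases List.mem_map.mp hb with ⟨row, hrow, rfl⟩
            have := (List.all_eq_true.mp hu) row hrow
            have := eq_of_beq this
            omega
        rw [List.count_eq_length.mpr this, hu]
        simp
      · have hne : ¬ (∀ b ∈ labels, v r0 = b) := by
          intro hc
          apply hu
          rw [List.all_eq_true]
          intro row hrow
          have := hc (v row) (List.mem_cons_of_mem _ (List.mem_map.mpr ⟨row, hrow, rfl⟩))
          exact beq_iff_eq.mpr this.symm
        have : labels.count (v r0) ≠ labels.length := fun he =>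
          hne (List.count_eq_length.mp he)
        simp only [Bool.not_eq_true] at hu
        rw [hu]
        simp only [beq_eq_false_iff_ne, ne_eq]
        omega
    rw [hall]
    by_cases hu : rest.all (fun row => v row == v r0)
    · simp [hu]
    · simp only [Bool.not_eq_true] at hu
      simp only [hu, Bool.false_eq_true, if_false]
      by_cases hlen : idx ≤ 0
      · have hlen' : (r0.length : Int) ≤ 1 := by omega
        rw [if_pos hlen', if_pos hlen]
        -- both sides are the first label of maximal count
        simp only [PySem.List.count_eq]
        set g : Int → Int := fun k => (labels.count k : Int) with hg
        have hitems : (PySem.Dict.counter labels).items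
            = (PySem.Set.ofList labels).map (fun k => (k, g k)) := by
          rw [PySem.Dict.items_counter]
        have hchain : (PySem.List.sorted (PySem.Dict.counter labels).items
              (fun kv => kv.2) true).head?
            = (PySem.List.max? labels g).map (fun k => (k, g k)) := by
          rw [head_sorted_rev_eq_max?, hitems, max?_map, max?_ofList]
        have hne2 : labels ≠ [] := by simp [hlabels']
        cases hmax : PySem.List.max? labels g with
        | none => exact absurd ((PySem.List.max?_eq_none_iff labels g).mp hmax) hne2
        | some m =>
          rw [hmax, Option.map_some] at hchain
          obtain ⟨tl, htl⟩ : ∃ tl, PySem.List.sorted (PySem.Dict.counter labels).items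
              (fun kv => kv.2) true = (m, g m) :: tl := by
            cases hs : PySem.List.sorted (PySem.Dict.counter labels).items
                (fun kv => kv.2) true with
            | nil => rw [hs] at hchain; simp at hchain
            | cons p tl =>
              rw [hs] at hchain
              simp only [List.head?_cons, Option.some.injEq] at hchain
              exact ⟨tl, by rw [hchain]⟩
          rw [htl]
          have : PySem.List.pyGet? ((m, g m) :: tl) 0 = some (m, g m) := by
            simp [PySem.List.pyGet?, PySem.List.pyIdx?]
          rw [this]
          rfl
      · have hlen' : ¬ (r0.length : Int) ≤ 1 := by omega
        rw [if_neg hlen', if_neg hlen]
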